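-- pv_equiv track=rewrite | github.com/arborist-mendelu/dynatree | lib_dynatree.py | get_chains_of_bendlines
-- ===== SOURCE A (Python) =====
-- def probes(b, axis="Y", cam = 1):
--     """
--     Ouptuts the chain of probes on bendlines. BL 44, 52 and 60 are shorter (end
--     points plus five points inside), the other are longer (10 points inside).
--
--
--     Parameters
--     ----------
--     b : TYPE
--         DESCRIPTION.
--     axis : TYPE, optional
--         DESCRIPTION. The default is "Y".
--     cam : 1 pro kameru z boku (default), 0 pro kameru ve směru tahu
--
--     Returns
--     -------
--     out : List of 7 or 12 tuples with names of probes on bendline from top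
--     to the bottom.
--
--     """
--     coord = axis
--     if cam==1:
--         bls = [44,52,60]
--     else:
--         bls = [10,18,26]
--     if b in bls:
--         num = 5
--     else:
--         num = 10
--     out = [(f"BL{b}",j) for j in [f"Pt0A{coord}", *[f"{coord}{i}" for i in range(num)], f"Pt0B{coord}"]]
--     return out
--
-- def get_chains_of_bendlines(axis="Y", cam=1):
--     if cam == 1:
--         start = 44 # side view
--     else:
--         start = 10 # back view
--     # Find probes on all bendlines
--     A = [ probes(i,axis=axis,cam=cam) for i in range(start,start+24)]
--     # Convert into one long list
--     all = sum(A, start = [])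
--     # Split list into three parallel bendlines
--     l = len(all)
--     output = [all[i*l//3:(i+1)*l//3] for i in range(3)]
--     return output
-- ===== SOURCE B (Python) =====
-- def get_chains_of_bendlines(axis="Y", cam=1):
--     # Group the 24 bendlines into three contiguous groups of 8 and flatten
--     # each group directly; the first bendline of each group is the short one.
--     start = 44 if cam == 1 else 10
--     def chain(g0):
--         out = []
--         for b in range(g0, g0 + 8):
--             num = 5 if b == g0 else 10
--             names = [f"Pt0A{axis}"] + [f"{axis}{i}" for i in range(num)] + [f"Pt0B{axis}"]
--             out.extend((f"BL{b}", j) for j in names)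
--         return out
--     return [chain(start + 8 * k) for k in range(3)]
-- ===== Notes on version B (the rewrite author's own statement) =====
-- stated objective: simpler
-- what changed: B builds each of the three chains directly by iterating its own contiguous group of 8 bendlines (the group's first bendline being the short one), instead of flattening all 24 bendlines into one list and slicing it into thirds by computed length.
import Mathlib
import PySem

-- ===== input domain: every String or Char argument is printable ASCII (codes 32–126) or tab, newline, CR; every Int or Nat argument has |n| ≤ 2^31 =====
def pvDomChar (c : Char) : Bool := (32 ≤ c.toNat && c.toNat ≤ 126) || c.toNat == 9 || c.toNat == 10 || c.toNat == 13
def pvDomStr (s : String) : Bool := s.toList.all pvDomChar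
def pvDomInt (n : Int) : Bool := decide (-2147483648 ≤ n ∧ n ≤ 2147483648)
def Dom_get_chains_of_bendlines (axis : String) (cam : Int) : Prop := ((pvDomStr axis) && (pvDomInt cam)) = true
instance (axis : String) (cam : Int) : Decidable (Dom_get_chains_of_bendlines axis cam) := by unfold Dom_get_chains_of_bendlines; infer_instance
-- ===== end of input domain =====

-- B builds each of the three chains directly from its own contiguous group of 8 bendlines
-- (the group's first bendline is the short one), instead of flattening all 24 bendlines
-- into one list and slicing it into thirds by computed length.


-- ===== PORT A =====
def probes (b : Int) (axis : String) (cam : Int) : List (String × String) :=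
  let coord := axis
  let bls : List Int := if cam == 1 then [44, 52, 60] else [10, 18, 26]
  let num : Int := if bls.contains b then 5 else 10
  let names : List String :=
    ("Pt0A" ++ coord) ::
      ((PySem.List.pyRange 0 num 1).map (fun i => coord ++ PySem.Int.toStr i)
        ++ [("Pt0B" ++ coord)])
  names.map (fun j => ("BL" ++ PySem.Int.toStr b, j))

def get_chains_of_bendlines (axis : String) (cam : Int) : List (List (String × String)) :=
  let start : Int := if cam == 1 then 44 else 10
  let A := (PySem.List.pyRange start (start + 24) 1).map (fun i => probes i axis cam)
  let all := A.foldl (fun acc x => acc ++ x) []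
  let l : Int := (all.length : Int)
  (PySem.List.pyRange 0 3 1).map (fun i =>
    PySem.List.slice all (some (PySem.Int.floordiv (i * l) 3))
      (some (PySem.Int.floordiv ((i + 1) * l) 3)))

-- ===== PORT B =====
-- body of B's inner loop: all probe tuples of bendline b inside the group starting at g0
def chainBody (axis : String) (g0 b : Int) : List (String × String) :=
  let num : Int := if b == g0 then 5 else 10
  let names : List String :=
    ("Pt0A" ++ axis) ::
      ((PySem.List.pyRange 0 num 1).map (fun i => axis ++ PySem.Int.toStr i)
        ++ [("Pt0B" ++ axis)])
  names.map (fun j => ("BL" ++ PySem.Int.toStr b, j))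

def chain_alt (axis : String) (g0 : Int) : List (String × String) :=
  (PySem.List.pyRange g0 (g0 + 8) 1).foldl (fun out b => out ++ chainBody axis g0 b) []

def get_chains_of_bendlines_alt (axis : String) (cam : Int) : List (List (String × String)) :=
  let start : Int := if cam == 1 then 44 else 10
  (PySem.List.pyRange 0 3 1).map (fun k => chain_alt axis (start + 8 * k))

-- ===== PRECONDITION & SPEC =====
def Spec_get_chains_of_bendlines (axis : String) (cam : Int) (out : List (List (String × String))) : Prop := out = get_chains_of_bendlines_alt axis cam
instance (axis : String) (cam : Int) (out : List (List (String × String))) : Decidable (Spec_get_chains_of_bendlines axis cam out) := by unfold Spec_get_chains_of_bendlines; infer_instance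

-- ===== CLAIM (what is proved, stated in full; the proofs are below) =====
def Claim_equal_get_chains_of_bendlines : Prop := ∀ (axis : String) (cam : Int), Dom_get_chains_of_bendlines axis cam → Spec_get_chains_of_bendlines axis cam (get_chains_of_bendlines axis cam)

-- ===== LEMMAS AND PROOFS =====

-- a group's flattened probes (A's view) is exactly B's chain, once the short-bendline
-- test 'b ∈ bls' coincides with 'b = group start' on the group
lemma seg_eq (axis : String) (cam : Int) (bls : List Int) (g : Int)
    (hbls : (if cam == 1 then ([44, 52, 60] : List Int) else [10, 18, 26]) = bls)
    (hmem : ∀ b ∈ PySem.List.pyRange g (g + 8) 1, bls.contains b = (b == g)) :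
    (PySem.List.pyRange g (g + 8) 1).flatMap (fun b => probes b axis cam) = chain_alt axis g := by
  unfold chain_alt
  rw [PySem.List.foldl_append_eq_flatMap, List.nil_append]
  apply List.flatMap_congr
  intro b hb
  simp only [probes, chainBody, hbls, hmem b hb]

lemma chainBody_len (axis : String) (g0 b : Int) :
    (chainBody axis g0 b).length = if b == g0 then 7 else 12 := by
  unfold chainBody
  by_cases h : (b == g0) = true
  · simp [h, show PySem.List.pyRange 0 5 1 = [0,1,2,3,4] by decide]
  · simp at h
    simp [h, show PySem.List.pyRange 0 10 1 = [0,1,2,3,4,5,6,7,8,9] by decide]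

lemma chain_len (axis : String) (g : Int)
    (h8 : PySem.List.pyRange g (g + 8) 1 = [g, g+1, g+2, g+3, g+4, g+5, g+6, g+7]) :
    (chain_alt axis g).length = 91 := by
  unfold chain_alt
  rw [PySem.List.foldl_append_eq_flatMap, List.nil_append, h8]
  simp [chainBody_len]

-- slicing an 91+91+91 concatenation at 0/91/182/273 recovers the three parts
lemma slice3_1 {α : Type} (c1 c2 c3 : List α) (h1 : c1.length = 91) :
    PySem.List.slice ((c1 ++ c2) ++ c3) (some 0) (some 91) = c1 := by
  rw [PySem.List.slice_zero_start, PySem.List.slice_to _ (by norm_num), List.append_assoc]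
  rw [show ((91:Int)).toNat = c1.length by omega, List.take_left]

lemma slice3_2 {α : Type} (c1 c2 c3 : List α) (h1 : c1.length = 91) (h2 : c2.length = 91) :
    PySem.List.slice ((c1 ++ c2) ++ c3) (some 91) (some 182) = c2 := by
  rw [PySem.List.slice_toNat _ (by norm_num) (by norm_num), List.append_assoc]
  rw [show ((91:Int)).toNat = c1.length by omega, List.drop_left]
  rw [show ((182:Int)).toNat - c1.length = c2.length by omega, List.take_left]

lemma slice3_3 {α : Type} (c1 c2 c3 : List α) (h1 : c1.length = 91) (h2 : c2.length = 91)
    (h3 : c3.length = 91) :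
    PySem.List.slice ((c1 ++ c2) ++ c3) (some 182) (some 273) = c3 := by
  rw [PySem.List.slice_toNat _ (by norm_num) (by norm_num)]
  rw [show ((182:Int)).toNat = (c1 ++ c2).length by simp [h1, h2], List.drop_left]
  rw [show ((273:Int)).toNat - (c1 ++ c2).length = c3.length by simp [h1, h2, h3], List.take_length]

-- the common core, for a concrete start s whose range facts are supplied by decide
lemma chains_core (axis : String) (cam s : Int)
    (hbls : (if cam == 1 then ([44, 52, 60] : List Int) else [10, 18, 26]) = [s, s+8, s+16])
    (hsplit : PySem.List.pyRange s (s + 24) 1 =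
      (PySem.List.pyRange s (s + 8) 1 ++ PySem.List.pyRange (s+8) ((s+8) + 8) 1)
        ++ PySem.List.pyRange (s+16) ((s+16) + 8) 1)
    (hm1 : ∀ b ∈ PySem.List.pyRange s (s + 8) 1, ([s, s+8, s+16] : List Int).contains b = (b == s))
    (hm2 : ∀ b ∈ PySem.List.pyRange (s+8) ((s+8) + 8) 1, ([s, s+8, s+16] : List Int).contains b = (b == s+8))
    (hm3 : ∀ b ∈ PySem.List.pyRange (s+16) ((s+16) + 8) 1, ([s, s+8, s+16] : List Int).contains b = (b == s+16))
    (h81 : PySem.List.pyRange s (s + 8) 1 = [s, s+1, s+2, s+3, s+4, s+5, s+6, s+7])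
    (h82 : PySem.List.pyRange (s+8) ((s+8) + 8) 1 = [s+8, s+8+1, s+8+2, s+8+3, s+8+4, s+8+5, s+8+6, s+8+7])
    (h83 : PySem.List.pyRange (s+16) ((s+16) + 8) 1 = [s+16, s+16+1, s+16+2, s+16+3, s+16+4, s+16+5, s+16+6, s+16+7]) :
    (PySem.List.pyRange 0 3 1).map (fun i =>
        PySem.List.slice
          (((PySem.List.pyRange s (s + 24) 1).map (fun i => probes i axis cam)).foldl
            (fun acc x => acc ++ x) [])
          (some (PySem.Int.floordiv (i * (((((PySem.List.pyRange s (s + 24) 1).map (fun i => probes i axis cam)).foldl (fun acc x => acc ++ x) []).length : Int))) 3))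
          (some (PySem.Int.floordiv ((i + 1) * (((((PySem.List.pyRange s (s + 24) 1).map (fun i => probes i axis cam)).foldl (fun acc x => acc ++ x) []).length : Int))) 3))) =
    (PySem.List.pyRange 0 3 1).map (fun k => chain_alt axis (s + 8 * k)) := by
  have hall : ((PySem.List.pyRange s (s + 24) 1).map (fun i => probes i axis cam)).foldl
      (fun acc x => acc ++ x) [] =
      (chain_alt axis s ++ chain_alt axis (s+8)) ++ chain_alt axis (s+16) := by
    rw [PySem.List.foldl_append_eq_flatten, List.nil_append, ← List.flatMap_def, hsplit,
      List.flatMap_append, List.flatMap_append,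
      seg_eq axis cam _ s hbls hm1, seg_eq axis cam _ (s+8) hbls hm2,
      seg_eq axis cam _ (s+16) hbls hm3]
  have l1 := chain_len axis s h81
  have l2 := chain_len axis (s+8) h82
  have l3 := chain_len axis (s+16) h83
  have hlen : (((chain_alt axis s ++ chain_alt axis (s+8)) ++ chain_alt axis (s+16)).length : Int) = 273 := by
    simp [l1, l2, l3]
  rw [show PySem.List.pyRange 0 3 1 = [0, 1, 2] by decide]
  simp only [List.map_cons, List.map_nil, hall, hlen]
  rw [show PySem.Int.floordiv ((0:Int) * 273) 3 = 0 by decide,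
      show PySem.Int.floordiv (((0:Int) + 1) * 273) 3 = 91 by decide,
      show PySem.Int.floordiv ((1:Int) * 273) 3 = 91 by decide,
      show PySem.Int.floordiv (((1:Int) + 1) * 273) 3 = 182 by decide,
      show PySem.Int.floordiv ((2:Int) * 273) 3 = 182 by decide,
      show PySem.Int.floordiv (((2:Int) + 1) * 273) 3 = 273 by decide]
  rw [slice3_1 _ _ _ l1, slice3_2 _ _ _ l1 l2, slice3_3 _ _ _ l1 l2 l3]
  norm_num

-- ===== VERDICT (by name: the statement is the Claim_ definition above) =====
theorem get_chains_of_bendlines_spec : Claim_equal_get_chains_of_bendlines := by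
  intro axis cam _
  unfold Spec_get_chains_of_bendlines get_chains_of_bendlines get_chains_of_bendlines_alt
  by_cases hc : cam = 1
  · subst hc
    simp only [show ((1:Int) == 1) = true by decide, if_true]
    exact chains_core axis 1 44 (by decide) (by decide) (by decide) (by decide) (by decide)
      (by decide) (by decide) (by decide)
  · have hb : (cam == 1) = false := by simp [hc]
    simp only [hb]
    refine chains_core axis cam 10 ?_ (by decide) (by decide) (by decide) (by decide)
      (by decide) (by decide) (by decide)
    rw [hb]; decide
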